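-- pv_equiv track=rewrite | github.com/arg0/py-cli | climate/flags.py | convert_arg_line_to_args
-- ===== SOURCE A (Python) =====
-- def convert_arg_line_to_args(line):
--     '''Remove # comments and blank lines from arg files.'''
--     S = '__@__'
--     line = line.replace(r'\#', S).split('#')[0].strip().replace(S, '#')
--     if line:
--         if line[0] == '-' and ' ' in line:
--             for p in line.split():
--                 yield p
--         else:
--             yield line
-- ===== SOURCE B (Python) =====
-- def convert_arg_line_to_args(line):
--     '''Remove # comments and blank lines from arg files.'''
--     out = []
--     i = 0
--     n = len(line)
--     while i < n:
--         c = line[i]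
--         if c == '\\' and i + 1 < n and line[i+1] == '#':
--             out.append('#'); i += 2
--         elif c == '#':
--             break
--         else:
--             out.append(c); i += 1
--     s = ''.join(out).strip()
--     if s:
--         if s[0] == '-' and ' ' in s:
--             for p in s.split():
--                 yield p
--         else:
--             yield s
-- ===== Notes on version B (the rewrite author's own statement) =====
-- stated objective: idiomatic
-- what changed: Replaces A's sentinel-string dance (replace '\#' with '__@__', split on '#', strip, replace the sentinel back) by a single explicit left-to-right character scan that emits '#' for an escaped '\#', stops at a bare '#', and copies everything else, then strips; the yield logic is unchanged.
-- intended difference: On lines whose content before the first unescaped '#' contains '__@__', '__@\#' or '__@_\#', A's sentinel collides with line content and A returns a corrupted string in which those characters come back as '#' (e.g. '__@__' -> ['#']); B returns the characters literally ('__@__' -> ['__@__']), which is the intended comment-stripping behaviour. — e.g. on convert_arg_line_to_args("__@__"): A returns ["#"], B returns ["__@__"]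
import Mathlib
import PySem

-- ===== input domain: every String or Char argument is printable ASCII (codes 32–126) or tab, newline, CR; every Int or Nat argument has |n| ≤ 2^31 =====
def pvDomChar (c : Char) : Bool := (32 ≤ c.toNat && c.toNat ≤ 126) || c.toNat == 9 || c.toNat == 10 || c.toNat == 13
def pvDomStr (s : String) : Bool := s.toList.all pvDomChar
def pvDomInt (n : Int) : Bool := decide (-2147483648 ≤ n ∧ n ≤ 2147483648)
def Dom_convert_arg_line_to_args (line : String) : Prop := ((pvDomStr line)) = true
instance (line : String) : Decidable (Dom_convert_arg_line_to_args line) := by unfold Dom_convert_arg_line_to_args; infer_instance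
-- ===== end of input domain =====

-- B replaces A's sentinel-swap comment stripping by one explicit character scan ('\#' -> '#', stop at bare '#'); on lines where A's
-- '__@__' sentinel collides with line content (D_ below) B returns the literal characters instead of A's corrupted string.


-- ===== PORT A =====
-- line.replace('\#','__@__').split('#')[0].strip().replace('__@__','#'); split('#') is never empty, so the
-- [0] (ported as pyGet? … |>.getD "") cannot raise.
def pvLine2 (line : String) : String :=
  PySem.Str.replace (PySem.Str.strip ((PySem.List.pyGet?
    ((PySem.Str.split? (PySem.Str.replace line "\\#" "__@__") "#").getD []) 0).getD "")) "__@__" "#"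

def convert_arg_line_to_args (line : String) : List String :=
  if pvLine2 line ≠ "" then
    if (PySem.Str.pyGet? (pvLine2 line) 0 == some '-') && PySem.Str.isIn " " (pvLine2 line) then
      PySem.Str.split₀ (pvLine2 line)
    else [pvLine2 line]
  else []

-- ===== PORT B =====
-- Source B's while-loop scan: '\' immediately followed by '#' emits '#' and skips both, a bare '#' stops, anything else is copied.
def convert_arg_line_to_args_alt (line : String) : List String :=
  if stripped line = "" then []
  else if (PySem.Str.pyGet? (stripped line) 0 == some '-') && PySem.Str.isIn " " (stripped line) then
    PySem.Str.split₀ (stripped line)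
  else [stripped line]
where
  scan : List Char → List Char
    | '\\' :: '#' :: t => '#' :: scan t
    | '#' :: _ => []
    | c :: t => c :: scan t
    | [] => []
  stripped (line : String) : String := PySem.Str.strip (String.ofList (scan line.toList))

-- ===== PRECONDITION & SPEC =====
-- On lines whose content before the first unescaped '#' contains '__@__', '__@\#' or '__@_\#', A's sentinel collides with line
-- content and A returns a corrupted string in which those characters come back as '#' (e.g. '__@__' -> ['#']); B returns the
-- characters literally ('__@__' -> ['__@__']), the intended comment-stripping behaviour.
-- (D_ marks escaped '\#' pairs with the control character 0x11 — absent from the printable input domain — cuts at the first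
-- remaining '#', and looks for the three collision patterns in that prefix.)
def D_convert_arg_line_to_args (line : String) : Prop :=
  ∃ t ∈ (["__@__", "__@\x11\x11", "__@_\x11\x11"] : List String),
    PySem.Str.isIn t
      (String.ofList ((PySem.Str.replace line "\\#" "\x11\x11").toList.takeWhile (· != '#')))
instance (line : String) : Decidable (D_convert_arg_line_to_args line) := by
  unfold D_convert_arg_line_to_args; infer_instance

def Spec_convert_arg_line_to_args (line : String) (out : List String) : Prop :=
  ¬ D_convert_arg_line_to_args line → out = convert_arg_line_to_args_alt line
instance (line : String) (out : List String) : Decidable (Spec_convert_arg_line_to_args line out) := by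
  unfold Spec_convert_arg_line_to_args; infer_instance

def pvDiffWitness_convert_arg_line_to_args : String := "__@__"
def pvDiffWitnessOut_convert_arg_line_to_args : (List String) × (List String) := (["#"], ["__@__"])

-- ===== CLAIM =====
def Claim_unchanged_convert_arg_line_to_args : Prop :=
  ∀ (line : String), Dom_convert_arg_line_to_args line →
    Spec_convert_arg_line_to_args line (convert_arg_line_to_args line)
def Claim_changed_convert_arg_line_to_args : Prop :=
  Dom_convert_arg_line_to_args (pvDiffWitness_convert_arg_line_to_args) ∧
  D_convert_arg_line_to_args (pvDiffWitness_convert_arg_line_to_args) ∧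
  convert_arg_line_to_args (pvDiffWitness_convert_arg_line_to_args) = pvDiffWitnessOut_convert_arg_line_to_args.1 ∧
  convert_arg_line_to_args_alt (pvDiffWitness_convert_arg_line_to_args) = pvDiffWitnessOut_convert_arg_line_to_args.2 ∧
  pvDiffWitnessOut_convert_arg_line_to_args.1 ≠ pvDiffWitnessOut_convert_arg_line_to_args.2

-- ===== LEMMAS AND PROOFS =====

-- pvHasTrig: a recursive scanner used ONLY in the proofs; true iff one of the three sentinel-collision
-- triggers occurs before the first unescaped '#'.
def pvHasTrig : List Char → Bool
  | [] => false
  | c :: t =>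
    if ['_','_','@','_','_'].isPrefixOf (c :: t) ∨ ['_','_','@','\\','#'].isPrefixOf (c :: t)
        ∨ ['_','_','@','_','\\','#'].isPrefixOf (c :: t) then true
    else if c = '#' then false
    else
      match t with
      | [] => false
      | d :: u => if c = '\\' ∧ d = '#' then pvHasTrig u else pvHasTrig (d :: u)

def pvS : List Char := ['_','_','@','_','_']

def pvReplEsc : List Char → List Char
  | [] => []
  | c :: t => if ['\\','#'].isPrefixOf (c :: t) then pvS ++ pvReplEsc (t.drop 1) else c :: pvReplEsc t
termination_by l => l.length
decreasing_by all_goals simp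

def pvReplBack : List Char → List Char
  | [] => []
  | c :: t => if pvS.isPrefixOf (c :: t) then '#' :: pvReplBack (t.drop 4) else c :: pvReplBack t
termination_by l => l.length
decreasing_by all_goals simp

def pvTakeNC (l : List Char) : List Char := l.takeWhile (fun c => c != '#')

theorem pv_go_esc (fuel : Nat) : ∀ (l acc : List Char), l.length ≤ fuel →
    PySem.Chars.replace.go ['\\','#'] pvS fuel l acc = acc.reverse ++ pvReplEsc l := by
  induction fuel with
  | zero =>
    intro l acc h
    have : l = [] := by cases l <;> simp_all
    subst this
    rw [PySem.Chars.replace.go.eq_def]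
    simp [pvReplEsc]
  | succ n ih =>
    intro l acc h
    rcases l with _ | ⟨c, t⟩
    · rw [PySem.Chars.replace.go.eq_def]; simp [pvReplEsc]
    · rw [PySem.Chars.replace.go.eq_def]
      by_cases hp : ['\\','#'].isPrefixOf (c :: t)
      · simp only [hp, if_true]
        have hpre : ['\\','#'] <+: (c :: t) := by
          rwa [← List.isPrefixOf_iff_prefix]
        obtain ⟨hc, ht⟩ := (List.cons_prefix_cons).1 hpre
        obtain ⟨u, hu⟩ : ∃ u, t = '#' :: u := by
          rcases t with _ | ⟨d, u⟩
          · simp at ht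
          · obtain ⟨hd, -⟩ := (List.cons_prefix_cons).1 ht
            exact ⟨u, by rw [hd]⟩
        subst hc hu
        have hlen : u.length ≤ n := by simp at h; omega
        rw [show List.drop (List.length ['\\','#']) ('\\' :: '#' :: u) = u by simp]
        rw [ih u (pvS.reverse ++ acc) hlen]
        rw [pvReplEsc]
        simp [hp]
      · simp only [hp]
        rw [ih t (c :: acc) (by simpa using Nat.le_of_succ_le_succ h)]
        rw [pvReplEsc]
        simp [hp]

theorem pv_replace_esc (l : List Char) : PySem.Chars.replace l ['\\','#'] pvS = pvReplEsc l := by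
  rw [PySem.Chars.replace]
  simp only [List.isEmpty_cons, Bool.false_eq_true, if_false]
  simpa using pv_go_esc l.length l [] le_rfl

theorem pv_go_back (fuel : Nat) : ∀ (l acc : List Char), l.length ≤ fuel →
    PySem.Chars.replace.go pvS ['#'] fuel l acc = acc.reverse ++ pvReplBack l := by
  induction fuel with
  | zero =>
    intro l acc h
    have : l = [] := by cases l <;> simp_all
    subst this
    rw [PySem.Chars.replace.go.eq_def]
    simp [pvReplBack]
  | succ n ih =>
    intro l acc h
    rcases l with _ | ⟨c, t⟩
    · rw [PySem.Chars.replace.go.eq_def]; simp [pvReplBack]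
    · rw [PySem.Chars.replace.go.eq_def]
      by_cases hp : pvS.isPrefixOf (c :: t)
      · simp only [hp, if_true]
        have hpre : pvS <+: (c :: t) := by rwa [← List.isPrefixOf_iff_prefix]
        have hlen5 : 5 ≤ (c :: t).length := by
          simpa [pvS] using hpre.length_le
        have hlen : (t.drop 4).length ≤ n := by simp at h hlen5 ⊢; omega
        rw [show List.drop pvS.length (c :: t) = t.drop 4 by simp [pvS]]
        rw [ih (t.drop 4) (['#'].reverse ++ acc) hlen]
        rw [pvReplBack]
        simp [hp]
      · simp only [hp]
        rw [ih t (c :: acc) (by simpa using Nat.le_of_succ_le_succ h)]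
        rw [pvReplBack]
        simp [hp]

theorem pv_replace_back (l : List Char) : PySem.Chars.replace l pvS ['#'] = pvReplBack l := by
  rw [PySem.Chars.replace]
  simp only [pvS, List.isEmpty_cons, Bool.false_eq_true, if_false]
  simpa [pvS] using pv_go_back l.length l [] le_rfl

theorem pv_splitGo_acc (fuel : Nat) : ∀ (l cur : List Char) (acc : List (List Char)),
    PySem.Chars.splitOn.go ['#'] fuel l cur acc = acc.reverse ++ PySem.Chars.splitOn.go ['#'] fuel l cur [] := by
  induction fuel with
  | zero =>
    intro l cur acc
    rw [PySem.Chars.splitOn.go.eq_def, PySem.Chars.splitOn.go.eq_def]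
    cases l <;> simp
  | succ n ih =>
    intro l cur acc
    rcases l with _ | ⟨c, t⟩
    · rw [PySem.Chars.splitOn.go.eq_def, PySem.Chars.splitOn.go.eq_def]; simp
    · rw [PySem.Chars.splitOn.go.eq_def]
      conv_rhs => rw [PySem.Chars.splitOn.go.eq_def]
      by_cases hp : ['#'].isPrefixOf (c :: t)
      · simp only [hp, if_true]
        rw [ih (List.drop ['#'].length (c :: t)) [] (cur.reverse :: acc),
            ih (List.drop ['#'].length (c :: t)) [] [cur.reverse]]
        simp
      · simp only [hp]
        exact ih t (c :: cur) acc

theorem pv_splitGo_head (fuel : Nat) : ∀ (l cur : List Char), l.length < fuel →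
    (PySem.Chars.splitOn.go ['#'] fuel l cur []).head? = some (cur.reverse ++ pvTakeNC l) := by
  induction fuel with
  | zero => intro l cur h; simp at h
  | succ n ih =>
    intro l cur h
    rcases l with _ | ⟨c, t⟩
    · rw [PySem.Chars.splitOn.go.eq_def]; simp [pvTakeNC]
    · rw [PySem.Chars.splitOn.go.eq_def]
      by_cases hp : ['#'].isPrefixOf (c :: t)
      · have hc : c = '#' := by
          have := (List.isPrefixOf_iff_prefix).1 hp
          exact ((List.cons_prefix_cons).1 this).1.symm
        simp only [hp, if_true]
        rw [pv_splitGo_acc]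
        subst hc
        simp [pvTakeNC]
      · have hc : c ≠ '#' := by
          intro hc; apply hp
          rw [List.isPrefixOf_iff_prefix, hc]
          exact ⟨t, rfl⟩
        simp only [hp, Bool.false_eq_true, if_false]
        rw [ih t (c :: cur) (by simp at h ⊢; omega)]
        simp [pvTakeNC, hc]

theorem pv_splitOn_head (l : List Char) : (PySem.Chars.splitOn l ['#']).head? = some (pvTakeNC l) := by
  rw [PySem.Chars.splitOn]
  simpa using pv_splitGo_head (l.length + 1) l [] (by omega)

-- characterizations of the pattern matches
theorem convert_arg_line_to_args_alt.scan_pair (t : List Char) : convert_arg_line_to_args_alt.scan ('\\' :: '#' :: t) = '#' :: convert_arg_line_to_args_alt.scan t := rfl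
theorem convert_arg_line_to_args_alt.scan_stop (t : List Char) : convert_arg_line_to_args_alt.scan ('#' :: t) = [] := rfl
theorem convert_arg_line_to_args_alt.scan_cons (c : Char) (t : List Char)
    (h1 : ¬(c = '\\' ∧ t.head? = some '#')) (h2 : c ≠ '#') :
    convert_arg_line_to_args_alt.scan (c :: t) = c :: convert_arg_line_to_args_alt.scan t := by
  rw [convert_arg_line_to_args_alt.scan.eq_def]
  split <;> simp_all

theorem pvHasTrig_pair (t : List Char) :
    pvHasTrig ('\\' :: '#' :: t) = pvHasTrig t := rfl
theorem pvHasTrig_cons (c : Char) (t : List Char)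
    (h1 : ¬(c = '\\' ∧ t.head? = some '#')) (h2 : c ≠ '#')
    (h3 : ¬ (['_','_','@','_','_'] <+: (c :: t) ∨ ['_','_','@','\\','#'] <+: (c :: t)
        ∨ ['_','_','@','_','\\','#'] <+: (c :: t))) :
    pvHasTrig (c :: t) = pvHasTrig t := by
  have hd : ¬ (['_','_','@','_','_'].isPrefixOf (c :: t) ∨ ['_','_','@','\\','#'].isPrefixOf (c :: t)
      ∨ ['_','_','@','_','\\','#'].isPrefixOf (c :: t)) := by
    simpa [List.isPrefixOf_iff_prefix] using h3
  rw [pvHasTrig.eq_def]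
  simp only [if_neg hd, if_neg h2]
  rcases t with _ | ⟨d, u⟩
  · rfl
  · show (if c = '\\' ∧ d = '#' then pvHasTrig u else pvHasTrig (d :: u)) = pvHasTrig (d :: u)
    rw [if_neg (by simpa using h1)]

theorem pvReplEsc_nil : pvReplEsc [] = [] := by rw [pvReplEsc]
theorem pvReplEsc_pair (t : List Char) : pvReplEsc ('\\' :: '#' :: t) = pvS ++ pvReplEsc t := by
  rw [pvReplEsc]
  rw [if_pos (by rw [List.isPrefixOf_iff_prefix]; exact ⟨t, rfl⟩)]
  simp
theorem pvReplEsc_cons (c : Char) (t : List Char) (h1 : ¬(c = '\\' ∧ t.head? = some '#')) :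
    pvReplEsc (c :: t) = c :: pvReplEsc t := by
  rw [pvReplEsc]
  rw [if_neg]
  intro hp
  rw [List.isPrefixOf_iff_prefix] at hp
  obtain ⟨hc, ht⟩ := (List.cons_prefix_cons).1 hp
  rcases t with _ | ⟨d, u⟩
  · simp at ht
  · obtain ⟨hd, -⟩ := (List.cons_prefix_cons).1 ht
    exact h1 ⟨hc.symm, by rw [← hd]; rfl⟩

theorem pv_prefix_esc : ∀ (t : List Char), ['_','@','_','_'] <+: pvReplEsc t →
    ['_','@','_','_'] <+: t ∨ ['_','@','\\','#'] <+: t ∨ ['_','@','_','\\','#'] <+: t := by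
  intro t h
  rcases t with _ | ⟨a, t1⟩
  · rw [pvReplEsc_nil] at h; exact absurd h (by simp)
  by_cases hp1 : a = '\\' ∧ t1.head? = some '#'
  · rw [show a :: t1 = '\\' :: '#' :: t1.tail by
      rcases t1 with _ | ⟨x, u⟩ <;> simp_all [hp1.1]] at h
    rw [pvReplEsc_pair] at h
    simp [pvS, List.cons_prefix_cons] at h
  rw [pvReplEsc_cons _ _ hp1] at h
  obtain ⟨ha, h⟩ := (List.cons_prefix_cons).1 h
  rcases t1 with _ | ⟨b, t2⟩
  · rw [pvReplEsc_nil] at h; exact absurd h (by simp)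
  by_cases hp2 : b = '\\' ∧ t2.head? = some '#'
  · rw [show b :: t2 = '\\' :: '#' :: t2.tail by
      rcases t2 with _ | ⟨x, u⟩ <;> simp_all [hp2.1]] at h
    rw [pvReplEsc_pair] at h
    simp [pvS, List.cons_prefix_cons] at h
  rw [pvReplEsc_cons _ _ hp2] at h
  obtain ⟨hb, h⟩ := (List.cons_prefix_cons).1 h
  rcases t2 with _ | ⟨e, t3⟩
  · rw [pvReplEsc_nil] at h; exact absurd h (by simp)
  by_cases hp3 : e = '\\' ∧ t3.head? = some '#'
  · right; left
    rw [← ha, ← hb, hp3.1]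
    rcases t3 with _ | ⟨x, u⟩
    · simp at hp3
    · have hx : x = '#' := by simpa using hp3.2
      rw [hx]
      exact ⟨u, rfl⟩
  rw [pvReplEsc_cons _ _ hp3] at h
  obtain ⟨he, h⟩ := (List.cons_prefix_cons).1 h
  rcases t3 with _ | ⟨f, t4⟩
  · rw [pvReplEsc_nil] at h; exact absurd h (by simp)
  by_cases hp4 : f = '\\' ∧ t4.head? = some '#'
  · right; right
    rw [← ha, ← hb, ← he, hp4.1]
    rcases t4 with _ | ⟨x, u⟩
    · simp at hp4
    · have hx : x = '#' := by simpa using hp4.2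
      rw [hx]
      exact ⟨u, rfl⟩
  rw [pvReplEsc_cons _ _ hp4] at h
  obtain ⟨hf, -⟩ := (List.cons_prefix_cons).1 h
  left
  rw [← ha, ← hb, ← he, ← hf]
  exact ⟨t4, rfl⟩

theorem pvReplBack_nil : pvReplBack [] = [] := by rw [pvReplBack]
theorem pvReplBack_pvS (y : List Char) : pvReplBack (pvS ++ y) = '#' :: pvReplBack y := by
  show pvReplBack ('_' :: (['_','@','_','_'] ++ y)) = _
  rw [pvReplBack]
  rw [if_pos (by rw [List.isPrefixOf_iff_prefix]; exact ⟨y, rfl⟩)]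
  simp
theorem pvReplBack_cons (c : Char) (y : List Char) (h : ¬ pvS <+: (c :: y)) :
    pvReplBack (c :: y) = c :: pvReplBack y := by
  rw [pvReplBack, if_neg (by rwa [List.isPrefixOf_iff_prefix])]
theorem pvTakeNC_nil : pvTakeNC [] = [] := rfl
theorem pvTakeNC_pvS (y : List Char) : pvTakeNC (pvS ++ y) = pvS ++ pvTakeNC y := by
  simp [pvTakeNC, pvS, List.takeWhile]
theorem pvTakeNC_stop (y : List Char) : pvTakeNC ('#' :: y) = [] := rfl
theorem pvTakeNC_cons (c : Char) (y : List Char) (h : c ≠ '#') :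
    pvTakeNC (c :: y) = c :: pvTakeNC y := by
  unfold pvTakeNC
  rw [List.takeWhile_cons, if_pos (by simpa using h)]

theorem pv_trig_of_prefix (l : List Char)
    (h : ['_','_','@','_','_'] <+: l ∨ ['_','_','@','\\','#'] <+: l ∨ ['_','_','@','_','\\','#'] <+: l) :
    pvHasTrig l = true := by
  rcases h with ⟨u, hu⟩ | ⟨u, hu⟩ | ⟨u, hu⟩ <;> subst hu <;> rfl

theorem pv_main : ∀ (l : List Char), pvHasTrig l = false →
    pvReplBack (pvTakeNC (pvReplEsc l)) = convert_arg_line_to_args_alt.scan l := by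
  have aux : ∀ (n : Nat) (l : List Char), l.length ≤ n → pvHasTrig l = false →
      pvReplBack (pvTakeNC (pvReplEsc l)) = convert_arg_line_to_args_alt.scan l := by
    intro n
    induction n with
    | zero =>
      intro l hl _
      have : l = [] := by cases l <;> simp_all
      subst this
      rw [pvReplEsc_nil, pvTakeNC_nil, pvReplBack_nil]; rfl
    | succ n ih =>
      intro l hl h
      rcases l with _ | ⟨c, t⟩
      · rw [pvReplEsc_nil, pvTakeNC_nil, pvReplBack_nil]; rfl
      by_cases hpair : c = '\\' ∧ t.head? = some '#'
      · obtain ⟨u, hu⟩ : ∃ u, t = '#' :: u := by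
          rcases t with _ | ⟨x, u⟩
          · simp at hpair
          · have hx : x = '#' := by simpa using hpair.2
            exact ⟨u, by rw [hx]⟩
        subst hu
        rw [hpair.1]
        rw [hpair.1] at h
        rw [pvReplEsc_pair, pvTakeNC_pvS, pvReplBack_pvS]
        rw [convert_arg_line_to_args_alt.scan_pair]
        rw [pvHasTrig_pair] at h
        rw [ih u (by simp at hl; omega) h]
      by_cases hstop : c = '#'
      · subst hstop
        rw [pvReplEsc_cons _ _ hpair, pvTakeNC_stop, pvReplBack_nil, convert_arg_line_to_args_alt.scan_stop]
      · have hnotrig : ¬ (['_','_','@','_','_'] <+: (c :: t) ∨ ['_','_','@','\\','#'] <+: (c :: t)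
            ∨ ['_','_','@','_','\\','#'] <+: (c :: t)) := by
          intro hcon
          rw [pv_trig_of_prefix _ hcon] at h
          simp at h
        rw [pvReplEsc_cons _ _ hpair, pvTakeNC_cons _ _ hstop]
        have hnp : ¬ pvS <+: (c :: pvTakeNC (pvReplEsc t)) := by
          intro hyes
          obtain ⟨hc, hrest⟩ := (List.cons_prefix_cons).1 hyes
          have htrans : ['_','@','_','_'] <+: pvReplEsc t :=
            hrest.trans (List.takeWhile_prefix _)
          rcases pv_prefix_esc t htrans with hx | hx | hx
          · exact hnotrig (Or.inl (by rw [← hc]; exact (List.cons_prefix_cons).2 ⟨rfl, hx⟩))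
          · exact hnotrig (Or.inr (Or.inl (by rw [← hc]; exact (List.cons_prefix_cons).2 ⟨rfl, hx⟩)))
          · exact hnotrig (Or.inr (Or.inr (by rw [← hc]; exact (List.cons_prefix_cons).2 ⟨rfl, hx⟩)))
        rw [pvReplBack_cons _ _ hnp]
        rw [pvHasTrig_cons _ _ hpair hstop hnotrig] at h
        rw [ih t (by simp at hl; omega) h]
        rw [convert_arg_line_to_args_alt.scan_cons _ _ hpair hstop]
  intro l
  exact aux l.length l le_rfl

theorem pvS_nonws : ∀ c ∈ pvS, PySem.Chars.isspace c = false := by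
  intro c hc
  simp [pvS] at hc
  rcases hc with rfl | rfl | rfl <;> rfl

theorem pvRB_ne_nil (c : Char) (t : List Char) : pvReplBack (c :: t) ≠ [] := by
  rw [pvReplBack]; split <;> simp

theorem pv_not_prefix_of_ws_head (a : Char) (w : List Char)
    (ha : PySem.Chars.isspace a = true) : ¬ pvS <+: (a :: w) := by
  intro hp
  obtain ⟨h1, -⟩ := (List.cons_prefix_cons).1 hp
  rw [← h1] at ha
  simp [PySem.Chars.isspace] at ha

theorem pvRB_all_ws (w : List Char) (hw : ∀ c ∈ w, PySem.Chars.isspace c = true) :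
    pvReplBack w = w := by
  induction w with
  | nil => exact pvReplBack_nil
  | cons a w ih =>
    rw [pvReplBack_cons _ _ (pv_not_prefix_of_ws_head a w (hw a (by simp)))]
    rw [ih (fun c hc => hw c (by simp [hc]))]

theorem pvRB_ws_prefix (w z : List Char) (hw : ∀ c ∈ w, PySem.Chars.isspace c = true) :
    pvReplBack (w ++ z) = w ++ pvReplBack z := by
  induction w with
  | nil => simp
  | cons a w ih =>
    rw [List.cons_append, pvReplBack_cons _ _ (pv_not_prefix_of_ws_head a _ (hw a (by simp)))]
    rw [ih (fun c hc => hw c (by simp [hc]))]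
    simp

theorem pvRB_ws_suffix : ∀ (z w : List Char), (∀ c ∈ w, PySem.Chars.isspace c = true) →
    pvReplBack (z ++ w) = pvReplBack z ++ w := by
  have aux : ∀ (n : Nat) (z w : List Char), z.length ≤ n → (∀ c ∈ w, PySem.Chars.isspace c = true) →
      pvReplBack (z ++ w) = pvReplBack z ++ w := by
    intro n
    induction n with
    | zero =>
      intro z w hz hw
      have : z = [] := by cases z <;> simp_all
      subst this
      simp [pvRB_all_ws w hw, pvReplBack_nil]
    | succ n ih =>
      intro z w hz hw
      rcases z with _ | ⟨c, t⟩
      · simp [pvRB_all_ws w hw, pvReplBack_nil]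
      by_cases hp : pvS <+: (c :: t)
      · have hlen : 4 ≤ t.length := by
          have := hp.length_le; simp [pvS] at this; omega
        obtain ⟨y, hy⟩ := hp
        have hylen : y.length ≤ n := by
          have := congrArg List.length hy
          simp [pvS] at this hz
          omega
        rw [show (c :: t) ++ w = pvS ++ (y ++ w) by rw [← hy]; simp]
        rw [pvReplBack_pvS, ← hy, pvReplBack_pvS]
        rw [ih y w hylen hw]
        simp
      · have hp' : ¬ pvS <+: ((c :: t) ++ w) := by
          intro hyes
          rcases List.prefix_or_prefix_of_prefix hyes (List.prefix_append (c :: t) w) with hx | hx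
          · exact hp hx
          · obtain ⟨r, hr⟩ := hx
            rcases r with _ | ⟨r0, rs⟩
            · simp at hr; rw [← hr] at hp; exact hp (by exact ⟨[], by simp⟩)
            · have hr0S : r0 ∈ pvS := by rw [← hr]; simp
              have hr0w : r0 ∈ w := by
                obtain ⟨q, hq⟩ := hyes
                rw [← hr] at hq
                have : (r0 :: rs) ++ q = w := by
                  apply List.append_cancel_left (as := c :: t)
                  simpa [List.append_assoc] using hq
                rw [← this]; simp
              have := pvS_nonws r0 hr0S
              rw [hw r0 hr0w] at this
              simp at this
        rw [List.cons_append, pvReplBack_cons _ _ (by simpa using hp'), pvReplBack_cons _ _ hp]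
        rw [List.cons_append]
        congr 1
        exact ih t w (by simp at hz; omega) hw
  intro z w hw
  exact aux z.length z w le_rfl hw

theorem pv_getLast?_cons_ne (a : Char) (Y : List Char) (h : Y ≠ []) :
    (a :: Y).getLast? = Y.getLast? := by
  rw [show a :: Y = [a] ++ Y from rfl, List.getLast?_append_of_ne_nil _ h]

theorem pvRB_head_nonws (z : List Char)
    (hz : ∀ h, z.head? = some h → PySem.Chars.isspace h = false) :
    ∀ h, (pvReplBack z).head? = some h → PySem.Chars.isspace h = false := by
  rcases z with _ | ⟨c, t⟩
  · rw [pvReplBack_nil]; intro h hh; simp at hh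
  by_cases hp : pvS <+: (c :: t)
  · obtain ⟨y, hy⟩ := hp
    rw [← hy, pvReplBack_pvS]
    intro h hh
    simp at hh
    rw [← hh]; rfl
  · rw [pvReplBack_cons _ _ hp]
    intro h hh
    simp at hh
    exact hz h (by simp [hh.symm])

theorem pvRB_last_nonws : ∀ (z : List Char),
    (∀ e, z.getLast? = some e → PySem.Chars.isspace e = false) →
    ∀ e, (pvReplBack z).getLast? = some e → PySem.Chars.isspace e = false := by
  have aux : ∀ (n : Nat) (z : List Char), z.length ≤ n →
      (∀ e, z.getLast? = some e → PySem.Chars.isspace e = false) →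
      ∀ e, (pvReplBack z).getLast? = some e → PySem.Chars.isspace e = false := by
    intro n
    induction n with
    | zero =>
      intro z hlen hz
      have : z = [] := by cases z <;> simp_all
      subst this
      rw [pvReplBack_nil]; intro e he; simp at he
    | succ n ih =>
      intro z hlen hz
      rcases z with _ | ⟨c, t⟩
      · rw [pvReplBack_nil]; intro e he; simp at he
      by_cases hp : pvS <+: (c :: t)
      · obtain ⟨y, hy⟩ := hp
        have hylen : y.length ≤ n := by
          have := congrArg List.length hy
          simp [pvS] at this hlen
          omega
        rw [← hy, pvReplBack_pvS]
        rcases y with _ | ⟨y0, ys⟩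
        · rw [pvReplBack_nil]
          intro e he
          simp at he
          rw [← he]; rfl
        · intro e he
          rw [pv_getLast?_cons_ne _ _ (pvRB_ne_nil y0 ys)] at he
          refine ih (y0 :: ys) hylen ?_ e he
          intro e' he'
          apply hz e'
          rw [← hy]
          exact (List.getLast?_append_of_ne_nil pvS (by simp)).trans he'
      · rw [pvReplBack_cons _ _ hp]
        rcases t with _ | ⟨t0, ts⟩
        · intro e he
          rw [pvReplBack_nil] at he
          simp at he
          apply hz e
          simp_all
        · intro e he
          rw [pv_getLast?_cons_ne _ _ (pvRB_ne_nil t0 ts)] at he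
          refine ih (t0 :: ts) (by simp at hlen ⊢; omega) ?_ e he
          intro e' he'
          apply hz e'
          rw [List.getLast?_cons_cons]
          exact he'
  intro z
  exact aux z.length z le_rfl

theorem pv_dropWhile_all_append (w z : List Char)
    (hw : ∀ c ∈ w, PySem.Chars.isspace c = true) :
    (w ++ z).dropWhile PySem.Chars.isspace = z.dropWhile PySem.Chars.isspace := by
  induction w with
  | nil => simp
  | cons a w ih =>
    rw [List.cons_append, List.dropWhile_cons, if_pos (hw a (by simp))]
    exact ih (fun c hc => hw c (by simp [hc]))

theorem pv_dropWhile_head_not (z : List Char)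
    (hz : ∀ h, z.head? = some h → PySem.Chars.isspace h = false) :
    z.dropWhile PySem.Chars.isspace = z := by
  rcases z with _ | ⟨c, t⟩
  · simp
  · rw [List.dropWhile_cons, if_neg (by rw [hz c rfl]; simp)]

theorem pv_rev_decomp (Y : List Char) :
    Y = (Y.reverse.dropWhile PySem.Chars.isspace).reverse ++ (Y.reverse.takeWhile PySem.Chars.isspace).reverse := by
  rw [← List.reverse_append]
  conv_lhs => rw [← List.reverse_reverse Y]
  congr 1
  exact (List.takeWhile_append_dropWhile (p := PySem.Chars.isspace) (l := Y.reverse)).symm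

theorem pv_strip_decomp (X : List Char) :
    ∃ w1 w2, X = w1 ++ PySem.Chars.strip X ++ w2 ∧
      (∀ c ∈ w1, PySem.Chars.isspace c = true) ∧ (∀ c ∈ w2, PySem.Chars.isspace c = true) := by
  set Y := X.dropWhile PySem.Chars.isspace with hY
  refine ⟨X.takeWhile PySem.Chars.isspace, (Y.reverse.takeWhile PySem.Chars.isspace).reverse, ?_, ?_, ?_⟩
  · rw [PySem.Chars.strip, PySem.Chars.lstrip, PySem.Chars.rstrip, ← hY]
    rw [List.append_assoc, ← pv_rev_decomp Y]
    exact (List.takeWhile_append_dropWhile (p := PySem.Chars.isspace) (l := X)).symm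
  · intro c hc; exact List.mem_takeWhile_imp hc
  · intro c hc
    rw [List.mem_reverse] at hc
    exact List.mem_takeWhile_imp hc

theorem pv_strip_head_nonws (X : List Char) :
    ∀ h, (PySem.Chars.strip X).head? = some h → PySem.Chars.isspace h = false := by
  intro h hh
  rw [PySem.Chars.strip, PySem.Chars.lstrip, PySem.Chars.rstrip] at hh
  set Y := X.dropWhile PySem.Chars.isspace with hY
  obtain ⟨b, hb⟩ : ∃ b, (Y.reverse.dropWhile PySem.Chars.isspace).reverse = h :: b := by
    rcases hc : (Y.reverse.dropWhile PySem.Chars.isspace).reverse with _ | ⟨a, b⟩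
    · rw [hc] at hh; simp at hh
    · rw [hc] at hh; simp at hh; exact ⟨b, by rw [hh]⟩
  have hYeq := pv_rev_decomp Y
  rw [hb] at hYeq
  have hYhead : Y.head? = some h := by rw [hYeq]; simp
  have hdw := List.head?_dropWhile_not (p := PySem.Chars.isspace) (l := X)
  rw [← hY, hYhead] at hdw
  exact hdw

theorem pv_strip_last_nonws (X : List Char) :
    ∀ e, (PySem.Chars.strip X).getLast? = some e → PySem.Chars.isspace e = false := by
  intro e he
  rw [PySem.Chars.strip, PySem.Chars.lstrip, PySem.Chars.rstrip] at he
  rw [List.getLast?_reverse] at he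
  have hdw := List.head?_dropWhile_not (p := PySem.Chars.isspace)
      (l := (X.dropWhile PySem.Chars.isspace).reverse)
  rw [he] at hdw
  exact hdw

theorem pv_strip_of_wrapped (w1 y w2 : List Char)
    (h1 : ∀ c ∈ w1, PySem.Chars.isspace c = true)
    (h2 : ∀ c ∈ w2, PySem.Chars.isspace c = true)
    (hh : ∀ h, y.head? = some h → PySem.Chars.isspace h = false)
    (hl : ∀ e, y.getLast? = some e → PySem.Chars.isspace e = false) :
    PySem.Chars.strip (w1 ++ y ++ w2) = y := by
  rw [PySem.Chars.strip, PySem.Chars.lstrip, PySem.Chars.rstrip]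
  rw [List.append_assoc, pv_dropWhile_all_append _ _ h1]
  rcases y with _ | ⟨c, t⟩
  · simp only [List.nil_append]
    rw [List.dropWhile_eq_nil_iff.2 (fun x hx => h2 x hx)]
    simp
  · have e1 : List.dropWhile PySem.Chars.isspace (c :: (t ++ w2)) = c :: (t ++ w2) := by
      rw [List.dropWhile_cons, if_neg (by rw [hh c rfl]; simp)]
    rw [show c :: t ++ w2 = c :: (t ++ w2) from rfl, e1]
    rw [show c :: (t ++ w2) = (c :: t) ++ w2 from rfl]
    rw [List.reverse_append]
    rw [pv_dropWhile_all_append _ _ (fun x hx => h2 x (by simpa using hx))]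
    have e2 : List.dropWhile PySem.Chars.isspace (c :: t).reverse = (c :: t).reverse := by
      apply pv_dropWhile_head_not
      intro h hhh
      rw [List.head?_reverse] at hhh
      exact hl h hhh
    rw [e2, List.reverse_reverse]

theorem pv_strip_RB (X : List Char) :
    pvReplBack (PySem.Chars.strip X) = PySem.Chars.strip (pvReplBack X) := by
  obtain ⟨w1, w2, hX, hw1, hw2⟩ := pv_strip_decomp X
  conv_rhs => rw [hX]
  rw [List.append_assoc, pvRB_ws_prefix _ _ hw1, pvRB_ws_suffix _ _ hw2]
  rw [← List.append_assoc]
  rw [pv_strip_of_wrapped _ _ _ hw1 hw2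
    (pvRB_head_nonws _ (pv_strip_head_nonws X))
    (pvRB_last_nonws _ (pv_strip_last_nonws X))]

theorem pv_part0 (line : String) :
    ((PySem.List.pyGet? ((PySem.Str.split? (PySem.Str.replace line "\\#" "__@__") "#").getD []) 0).getD "").toList
      = pvTakeNC (pvReplEsc line.toList) := by
  have hs := PySem.Str.split?_map (PySem.Str.replace line "\\#" "__@__") "#"
  rcases hopt : PySem.Str.split? (PySem.Str.replace line "\\#" "__@__") "#" with _ | ps
  · rw [hopt] at hs
    simp [PySem.Chars.split?] at hs
  · rw [hopt] at hs
    rw [show ("#" : String).toList = ['#'] from rfl] at hs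
    rw [PySem.Chars.split?] at hs
    simp at hs
    have hhead := congrArg List.head? hs
    rw [List.head?_map, pv_splitOn_head] at hhead
    rw [show (['_','_','@','_','_'] : List Char) = pvS from rfl] at hhead
    rw [pv_replace_esc] at hhead
    rcases hps : ps.head? with _ | p0
    · rw [hps] at hhead; simp at hhead
    · rw [hps] at hhead
      simp at hhead
      have : (PySem.List.pyGet? ps 0).getD "" = p0 := by
        rw [PySem.List.pyGet?_zero, ← List.head?_eq_getElem?, hps]
        rfl
      rw [Option.getD_some, this]
      exact hhead

theorem pv_core (line : String) (h : pvHasTrig line.toList = false) :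
    pvLine2 line = convert_arg_line_to_args_alt.stripped line := by
  rw [← String.toList_inj]
  unfold pvLine2 convert_arg_line_to_args_alt.stripped
  rw [PySem.Str.toList_replace, PySem.Str.toList_strip, PySem.Str.toList_strip]
  rw [pv_part0 line]
  rw [String.toList_ofList]
  rw [show (['_','_','@','_','_'] : List Char) = pvS from rfl]
  rw [show ("#" : String).toList = ['#'] from rfl]
  rw [pv_replace_back, pv_strip_RB, pv_main _ h]
  rw [String.toList_ofList]

-- bridge: pvHasTrig = true implies the closed-form D_ condition
theorem pvHasTrig_stop (t : List Char) : pvHasTrig ('#' :: t) = false := by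
  rw [pvHasTrig.eq_def]
  simp [List.isPrefixOf]

theorem pv_trig_exists : ∀ (l : List Char), pvHasTrig l = true →
    ∃ i < l.length,
      (['_','_','@','_','_'] <+: l.drop i ∨ ['_','_','@','\\','#'] <+: l.drop i ∨
        ['_','_','@','_','\\','#'] <+: l.drop i) ∧
      ∀ j ≤ i, l[j]? = some '#' → 0 < j ∧ l[j-1]? = some '\\' := by
  have aux : ∀ (n : Nat) (l : List Char), l.length ≤ n → pvHasTrig l = true →
      ∃ i < l.length,
        (['_','_','@','_','_'] <+: l.drop i ∨ ['_','_','@','\\','#'] <+: l.drop i ∨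
          ['_','_','@','_','\\','#'] <+: l.drop i) ∧
        ∀ j ≤ i, l[j]? = some '#' → 0 < j ∧ l[j-1]? = some '\\' := by
    intro n
    induction n with
    | zero =>
      intro l hl h
      have : l = [] := by cases l <;> simp_all
      subst this
      simp [pvHasTrig] at h
    | succ n ih =>
      intro l hl h
      rcases l with _ | ⟨c, t⟩
      · simp [pvHasTrig] at h
      by_cases htrig : ['_','_','@','_','_'] <+: (c :: t) ∨ ['_','_','@','\\','#'] <+: (c :: t)
          ∨ ['_','_','@','_','\\','#'] <+: (c :: t)
      · refine ⟨0, by simp, by simpa using htrig, ?_⟩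
        intro j hj hget
        interval_cases j
        have hc : c = '_' := by
          rcases htrig with hx | hx | hx <;> exact ((List.cons_prefix_cons).1 hx).1.symm
        rw [List.getElem?_cons_zero, hc] at hget
        simp at hget
      by_cases hpair : c = '\\' ∧ t.head? = some '#'
      · obtain ⟨u, hu⟩ : ∃ u, t = '#' :: u := by
          rcases t with _ | ⟨x, u⟩
          · simp at hpair
          · exact ⟨u, by rw [show x = '#' by simpa using hpair.2]⟩
        subst hu
        rw [hpair.1] at h ⊢
        rw [pvHasTrig_pair] at h
        obtain ⟨i, hi, htr, hg⟩ := ih u (by simp at hl; omega) h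
        refine ⟨i + 2, by simp; omega, by simpa using htr, ?_⟩
        intro j hj hget
        match j, hget with
        | 0, hget => simp at hget
        | 1, _ => exact ⟨by omega, by simp⟩
        | (j' + 2), hget =>
          have hget' : u[j']? = some '#' := by simpa using hget
          obtain ⟨hpos, hprev⟩ := hg j' (by omega) hget'
          refine ⟨by omega, ?_⟩
          obtain ⟨k, hk⟩ : ∃ k, j' = k + 1 := ⟨j' - 1, by omega⟩
          subst hk
          show ('\\' :: '#' :: u)[k + 2]? = some '\\'
          simpa using hprev
      by_cases hstop : c = '#'
      · subst hstop
        rw [pvHasTrig_stop] at h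
        simp at h
      · rw [pvHasTrig_cons _ _ hpair hstop htrig] at h
        obtain ⟨i, hi, htr, hg⟩ := ih t (by simp at hl; omega) h
        refine ⟨i + 1, by simp; omega, by simpa using htr, ?_⟩
        intro j hj hget
        match j, hget with
        | 0, hget =>
          rw [List.getElem?_cons_zero] at hget
          exact absurd (by simpa using hget) hstop
        | (j' + 1), hget =>
          have hget' : t[j']? = some '#' := by simpa using hget
          obtain ⟨hpos, hprev⟩ := hg j' (by omega) hget'
          refine ⟨by omega, ?_⟩
          obtain ⟨k, hk⟩ : ∃ k, j' = k + 1 := ⟨j' - 1, by omega⟩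
          subst hk
          show (c :: t)[k + 1]? = some '\\'
          simpa using hprev
  intro l
  exact aux l.length l le_rfl

def pvQ : List Char := ['\x11', '\x11']

-- escape-replacement with the 0x11-pair replacement (the line.replace('\\#', '\x11\x11') of D_'s guard), list view
def pvReplQ : List Char → List Char
  | [] => []
  | c :: t => if ['\\','#'].isPrefixOf (c :: t) then pvQ ++ pvReplQ (t.drop 1) else c :: pvReplQ t
termination_by l => l.length
decreasing_by all_goals simp

theorem pv_go_q (fuel : Nat) : ∀ (l acc : List Char), l.length ≤ fuel →
    PySem.Chars.replace.go ['\\','#'] pvQ fuel l acc = acc.reverse ++ pvReplQ l := by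
  induction fuel with
  | zero =>
    intro l acc h
    have : l = [] := by cases l <;> simp_all
    subst this
    rw [PySem.Chars.replace.go.eq_def]
    simp [pvReplQ]
  | succ n ih =>
    intro l acc h
    rcases l with _ | ⟨c, t⟩
    · rw [PySem.Chars.replace.go.eq_def]; simp [pvReplQ]
    · rw [PySem.Chars.replace.go.eq_def]
      by_cases hp : ['\\','#'].isPrefixOf (c :: t)
      · simp only [hp, if_true]
        have hpre : ['\\','#'] <+: (c :: t) := by
          rwa [← List.isPrefixOf_iff_prefix]
        obtain ⟨hc, ht⟩ := (List.cons_prefix_cons).1 hpre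
        obtain ⟨u, hu⟩ : ∃ u, t = '#' :: u := by
          rcases t with _ | ⟨d, u⟩
          · simp at ht
          · obtain ⟨hd, -⟩ := (List.cons_prefix_cons).1 ht
            exact ⟨u, by rw [hd]⟩
        subst hc hu
        have hlen : u.length ≤ n := by simp at h; omega
        rw [show List.drop (List.length ['\\','#']) ('\\' :: '#' :: u) = u by simp]
        rw [ih u (pvQ.reverse ++ acc) hlen]
        rw [pvReplQ]
        simp [hp]
      · simp only [hp]
        rw [ih t (c :: acc) (by simpa using Nat.le_of_succ_le_succ h)]
        rw [pvReplQ]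
        simp [hp]

theorem pv_replace_q (l : List Char) : PySem.Chars.replace l ['\\','#'] pvQ = pvReplQ l := by
  rw [PySem.Chars.replace]
  simp only [List.isEmpty_cons, Bool.false_eq_true, if_false]
  simpa using pv_go_q l.length l [] le_rfl

theorem pvReplQ_pair (t : List Char) : pvReplQ ('\\' :: '#' :: t) = pvQ ++ pvReplQ t := by
  rw [pvReplQ]
  rw [if_pos (by rw [List.isPrefixOf_iff_prefix]; exact ⟨t, rfl⟩)]
  simp
theorem pvReplQ_cons (c : Char) (t : List Char) (h1 : ¬(c = '\\' ∧ t.head? = some '#')) :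
    pvReplQ (c :: t) = c :: pvReplQ t := by
  rw [pvReplQ]
  rw [if_neg]
  intro hp
  rw [List.isPrefixOf_iff_prefix] at hp
  obtain ⟨hc, ht⟩ := (List.cons_prefix_cons).1 hp
  rcases t with _ | ⟨d, u⟩
  · simp at ht
  · obtain ⟨hd, -⟩ := (List.cons_prefix_cons).1 ht
    exact h1 ⟨hc.symm, by rw [← hd]; rfl⟩

theorem pv_takeWhile_append_of_all (p : Char → Bool) (x y : List Char)
    (hx : ∀ c ∈ x, p c = true) : (x ++ y).takeWhile p = x ++ y.takeWhile p := by
  induction x with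
  | nil => simp
  | cons a x ih =>
    rw [List.cons_append, List.takeWhile_cons, if_pos (hx a (by simp))]
    rw [ih (fun c hc => hx c (by simp [hc]))]
    simp

theorem pvReplQ_nil : pvReplQ [] = [] := by rw [pvReplQ]

theorem pv_infix_ext_left (x y tq : List Char) (h : tq <:+: y) : tq <:+: x ++ y := by
  obtain ⟨s, t, rfl⟩ := h
  exact ⟨x ++ s, t, by simp⟩

theorem pv_tq_nil (tl tq : List Char)
    (h1 : ∀ r, pvReplQ (tl ++ r) = tq ++ pvReplQ r) (htl : tl = []) : tq = [] := by
  subst htl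
  have h0 := h1 []
  rw [show ([] : List Char) ++ [] = [] from rfl, pvReplQ_nil] at h0
  simpa using h0.symm

-- the transformed trigger tq is an infix of the pre-cut content whenever the raw trigger tl occurs at a
-- position i with no unescaped '#' before it
theorem pv_infix_main (tl tq : List Char)
    (h1 : ∀ r, pvReplQ (tl ++ r) = tq ++ pvReplQ r)
    (h2 : ∀ c ∈ tq, (c != '#') = true)
    (h3 : tl.head? ≠ some '#') :
    ∀ (n : Nat) (l : List Char) (i : Nat), l.length ≤ n → tl <+: l.drop i →
      (∀ j ≤ i, l[j]? = some '#' → 0 < j ∧ l[j-1]? = some '\\') →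
      tq <:+: (pvReplQ l).takeWhile (fun c => c != '#') := by
  intro n
  induction n with
  | zero =>
    intro l i hl hpre hg
    have hnil : l = [] := by cases l <;> simp_all
    subst hnil
    have htl : tl = [] := by simpa using hpre
    rw [pv_tq_nil tl tq h1 htl]
    exact List.nil_infix
  | succ n ih =>
    intro l i hl hpre hg
    rcases l with _ | ⟨c, t⟩
    · have htl : tl = [] := by simpa using hpre
      rw [pv_tq_nil tl tq h1 htl]
      exact List.nil_infix
    rcases i with _ | i'
    · -- trigger at the head: l = tl ++ r
      rw [List.drop_zero] at hpre
      obtain ⟨r, hr⟩ := hpre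
      rw [← hr, h1 r, pv_takeWhile_append_of_all _ _ _ h2]
      exact ⟨[], (pvReplQ r).takeWhile (fun c => c != '#'), by simp⟩
    by_cases hpair : c = '\\' ∧ t.head? = some '#'
    · obtain ⟨u, hu⟩ : ∃ u, t = '#' :: u := by
        rcases t with _ | ⟨x, u⟩
        · simp at hpair
        · exact ⟨u, by rw [show x = '#' by simpa using hpair.2]⟩
      subst hu
      obtain ⟨hc1, -⟩ := hpair
      subst hc1
      rw [pvReplQ_pair]
      rw [pv_takeWhile_append_of_all _ _ _ (by intro c hc; simp [pvQ] at hc; rw [hc]; rfl)]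
      apply pv_infix_ext_left
      rcases i' with _ | i''
      · -- the trigger would have to start at the '#' of the pair: its head differs
        rw [show List.drop 1 ('\\' :: '#' :: u) = '#' :: u from rfl] at hpre
        rcases tl with _ | ⟨a, tl'⟩
        · rw [pv_tq_nil [] tq h1 rfl]
          exact List.nil_infix
        · have ha : a = '#' := (List.cons_prefix_cons.1 hpre).1
          exact absurd (by rw [ha]; rfl) h3
      · refine ih u i'' (by simp at hl; omega) (by simpa using hpre) ?_
        intro j hj hx
        obtain ⟨hpos, hprev⟩ := hg (j + 2) (by omega) (by simpa using hx)
        rcases j with _ | j'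
        · simp at hprev
        · exact ⟨by omega, by simpa using hprev⟩
    · have hcne : c ≠ '#' := by
        intro hcc
        have := hg 0 (by omega) (by simp [hcc])
        omega
      rw [pvReplQ_cons _ _ hpair]
      rw [List.takeWhile_cons, if_pos (by simpa using hcne)]
      have hrec : tq <:+: (pvReplQ t).takeWhile (fun c => c != '#') := by
        refine ih t i' (by simp at hl; omega) (by simpa using hpre) ?_
        intro j hj hx
        obtain ⟨hpos, hprev⟩ := hg (j + 1) (by omega) (by simpa using hx)
        rcases j with _ | j'
        · exfalso
          simp at hprev
          exact hpair ⟨hprev, by rw [List.head?_eq_getElem?]; simpa using hx⟩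
        · exact ⟨by omega, by simpa using hprev⟩
      exact pv_infix_ext_left [c] _ _ hrec

-- the per-trigger step lemmas: pvReplQ maps the trigger to its transformed form and passes it through
theorem pv_q_t1 (r : List Char) :
    pvReplQ (("__@__" : String).toList ++ r) = ("__@__" : String).toList ++ pvReplQ r := by
  show pvReplQ ('_' :: '_' :: '@' :: '_' :: '_' :: r) = _
  rw [pvReplQ_cons _ _ (by simp), pvReplQ_cons _ _ (by simp), pvReplQ_cons _ _ (by simp),
      pvReplQ_cons _ _ (by simp), pvReplQ_cons _ _ (by simp)]
  rfl

theorem pv_q_t2 (r : List Char) :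
    pvReplQ (("__@\\#" : String).toList ++ r) = ("__@\x11\x11" : String).toList ++ pvReplQ r := by
  show pvReplQ ('_' :: '_' :: '@' :: '\\' :: '#' :: r) = _
  rw [pvReplQ_cons _ _ (by simp), pvReplQ_cons _ _ (by simp), pvReplQ_cons _ _ (by simp),
      pvReplQ_pair]
  rfl

theorem pv_q_t3 (r : List Char) :
    pvReplQ (("__@_\\#" : String).toList ++ r) = ("__@_\x11\x11" : String).toList ++ pvReplQ r := by
  show pvReplQ ('_' :: '_' :: '@' :: '_' :: '\\' :: '#' :: r) = _
  rw [pvReplQ_cons _ _ (by simp), pvReplQ_cons _ _ (by simp), pvReplQ_cons _ _ (by simp),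
      pvReplQ_cons _ _ (by simp), pvReplQ_pair]
  rfl

theorem pv_D_builder (line : String) (i : Nat) (tl tq : String)
    (ht : tq ∈ (["__@__", "__@\x11\x11", "__@_\x11\x11"] : List String))
    (h1 : ∀ r, pvReplQ (tl.toList ++ r) = tq.toList ++ pvReplQ r)
    (h2 : ∀ c ∈ tq.toList, (c != '#') = true)
    (h3 : tl.toList.head? ≠ some '#')
    (hpre : tl.toList <+: line.toList.drop i)
    (hg : ∀ j ≤ i, line.toList[j]? = some '#' → 0 < j ∧ line.toList[j-1]? = some '\\') :
    D_convert_arg_line_to_args line := by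
  refine ⟨tq, ht, ?_⟩
  rw [PySem.Str.isIn_iff_infix, String.toList_ofList]
  have hmain := pv_infix_main tl.toList tq.toList h1 h2 h3 line.toList.length line.toList i
    le_rfl hpre hg
  have hrepl : (PySem.Str.replace line "\\#" "\x11\x11").toList = pvReplQ line.toList := by
    rw [PySem.Str.toList_replace]
    rw [show ("\\#" : String).toList = ['\\','#'] from rfl,
        show ("\x11\x11" : String).toList = pvQ from rfl]
    exact pv_replace_q line.toList
  rw [hrepl]
  exact hmain

theorem pv_tl1 : ("__@__" : String).toList = ['_','_','@','_','_'] := by simp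
theorem pv_tl2 : ("__@\\#" : String).toList = ['_','_','@','\\','#'] := by simp
theorem pv_tl3 : ("__@_\\#" : String).toList = ['_','_','@','_','\\','#'] := by simp
theorem pv_tq2 : ("__@\x11\x11" : String).toList = ['_','_','@','\x11','\x11'] := by simp
theorem pv_tq3 : ("__@_\x11\x11" : String).toList = ['_','_','@','_','\x11','\x11'] := by simp

theorem pv_D_of_trig (line : String) (h : pvHasTrig line.toList = true) :
    D_convert_arg_line_to_args line := by
  obtain ⟨i, hi, htr, hg⟩ := pv_trig_exists line.toList h
  rcases htr with hx | hx | hx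
  · exact pv_D_builder line i "__@__" "__@__" (by simp)
      pv_q_t1 (by rw [pv_tl1]; intro c hc; fin_cases hc <;> rfl) (by rw [pv_tl1]; simp)
      (by rw [pv_tl1]; exact hx) hg
  · exact pv_D_builder line i "__@\\#" "__@\x11\x11" (by simp)
      pv_q_t2 (by rw [pv_tq2]; intro c hc; fin_cases hc <;> rfl) (by rw [pv_tl2]; simp)
      (by rw [pv_tl2]; exact hx) hg
  · exact pv_D_builder line i "__@_\\#" "__@_\x11\x11" (by simp)
      pv_q_t3 (by rw [pv_tq3]; intro c hc; fin_cases hc <;> rfl) (by rw [pv_tl3]; simp)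
      (by rw [pv_tl3]; exact hx) hg

-- ===== VERDICT =====
theorem convert_arg_line_to_args_spec : Claim_unchanged_convert_arg_line_to_args := by
  intro line _ hD
  have h : pvHasTrig line.toList = false := by
    cases hb : pvHasTrig line.toList
    · rfl
    · exact absurd (pv_D_of_trig line hb) hD
  have h2 : pvLine2 line = convert_arg_line_to_args_alt.stripped line := pv_core line h
  unfold convert_arg_line_to_args convert_arg_line_to_args_alt
  rw [h2]
  by_cases hse : convert_arg_line_to_args_alt.stripped line = ""
  · rw [if_neg (by simp [hse]), if_pos hse]
  · rw [if_pos hse, if_neg hse]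

theorem convert_arg_line_to_args_changed : Claim_changed_convert_arg_line_to_args := by
  unfold Claim_changed_convert_arg_line_to_args; decide
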